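-- pv_equiv track=rewrite | github.com/Radluy/Running-Gait-Analysis | src/stance_detector.py | create_frame_chunks
-- ===== SOURCE A (Python) =====
-- def create_frame_chunks(frame_list: list) -> list:
--     """Merges concurrent frames into chunks
--
--     Args:
--         frame_list (list): list of frames to be merged
--
--     Returns:
--         list: list of chunks, one chunk is array of frames
--     """
--     tmp_frame = frame_list[0]
--     chunk_list = [[tmp_frame]]
--
--     # merge into list if they're concurrent
--     for frame in frame_list[1:]:
--         if frame["ID"] == tmp_frame["ID"]+1:
--             chunk_list[-1].append(frame)
--         else:
--             chunk_list.append([frame])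
--         tmp_frame = frame
--
--     return chunk_list
-- ===== SOURCE B (Python) =====
-- from itertools import groupby
--
--
-- def create_frame_chunks(frame_list: list) -> list:
--     """Merges concurrent frames into chunks (groupby decomposition).
--
--     Consecutive-ID runs share a constant value of ID - position, so
--     grouping enumerate(frame_list) by that key yields exactly the chunks.
--     """
--     return [[frame for _, frame in group]
--             for _, group in groupby(enumerate(frame_list),
--                                     key=lambda p: p[1]["ID"] - p[0])]
-- ===== Notes on version B (the rewrite author's own statement) =====
-- stated objective: idiomatic
-- what changed: Replaces the maintained-previous-frame loop with mutation of the last chunk by a transform-then-group decomposition: groupby over enumerate(frame_list) with key ID - index, so consecutive-ID runs share a constant key.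
-- outside the precondition, e.g. on create_frame_chunks([{}]): A returns [[{}]], B raises KeyError
-- crash fix: On the empty list A raises IndexError (frame_list[0]); B returns []. — e.g. on create_frame_chunks([]): A raises IndexError, B returns []
import Mathlib
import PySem

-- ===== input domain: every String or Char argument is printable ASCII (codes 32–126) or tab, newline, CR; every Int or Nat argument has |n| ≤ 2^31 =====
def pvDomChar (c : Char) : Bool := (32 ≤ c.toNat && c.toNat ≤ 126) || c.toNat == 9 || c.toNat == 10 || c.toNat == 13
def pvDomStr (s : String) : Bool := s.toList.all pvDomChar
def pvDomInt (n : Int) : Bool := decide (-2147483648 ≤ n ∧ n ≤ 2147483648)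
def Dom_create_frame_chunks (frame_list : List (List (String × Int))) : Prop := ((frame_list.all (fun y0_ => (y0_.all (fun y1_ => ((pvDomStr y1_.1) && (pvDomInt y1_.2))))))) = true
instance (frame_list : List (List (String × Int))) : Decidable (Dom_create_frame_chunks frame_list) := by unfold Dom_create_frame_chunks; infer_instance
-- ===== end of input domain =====

-- B replaces A's previous-frame loop (mutating the last chunk) with an idiomatic
-- groupby-over-enumerate decomposition keyed by ID - index; return values agree on Pre_.


-- frame["ID"]: first match in the association list; Pre_ guarantees the key is present,
-- so the .getD 0 default is never reached on admitted inputs (Python raises KeyError there).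
def pvID (f : List (String × Int)) : Int := (List.lookup "ID" f).getD 0

-- ===== PORT A =====
-- chunk_list[-1].append(frame): append to the last chunk
def pvAppendLast (l : List (List (List (String × Int)))) (f : List (String × Int)) :
    List (List (List (String × Int))) :=
  match l with
  | [] => []
  | [c] => [c ++ [f]]
  | c :: cs => c :: pvAppendLast cs f

def create_frame_chunks (frame_list : List (List (String × Int))) : List (List (List (String × Int))) :=
  match frame_list with
  | [] => []   -- unreachable under Pre_ (Python: IndexError on frame_list[0])
  | tmp_frame :: rest =>
    (rest.foldl
      (fun (st : List (String × Int) × List (List (List (String × Int)))) frame =>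
        if pvID frame == pvID st.1 + 1 then (frame, pvAppendLast st.2 frame)
        else (frame, st.2 ++ [[frame]]))
      (tmp_frame, [[tmp_frame]])).2

-- ===== PORT B =====
-- itertools.groupby: split into maximal runs of adjacent elements with equal key
def pvGroupBy {α : Type} (k : α → Int) : List α → List (List α)
  | [] => []
  | [x] => [[x]]
  | x :: y :: xs =>
    match pvGroupBy k (y :: xs) with
    | [] => [[x]]
    | g :: gs => if k x == k y then (x :: g) :: gs else [x] :: g :: gs

def create_frame_chunks_alt (frame_list : List (List (String × Int))) : List (List (List (String × Int))) :=
  (pvGroupBy (fun p => pvID p.2 - p.1) (PySem.List.enumerate frame_list)).map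
    (fun g => g.map (·.2))

-- ===== PRECONDITION & SPEC =====
-- Pre_ excludes the inputs where A raises — the empty list (IndexError on frame_list[0])
-- and lists of length ≥ 2 with a frame lacking an "ID" key (KeyError) — plus the
-- single-frame list without an "ID" key, where A returns without ever reading the key
-- but B's groupby key raises KeyError (so B cannot match; see the cite in the claim).
def Pre_create_frame_chunks (frame_list : List (List (String × Int))) : Prop :=
  frame_list ≠ [] ∧ ∀ f ∈ frame_list, "ID" ∈ f.map Prod.fst
instance (frame_list : List (List (String × Int))) : Decidable (Pre_create_frame_chunks frame_list) := by unfold Pre_create_frame_chunks; infer_instance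

def pvWitness_create_frame_chunks : (List (List (String × Int))) :=
  [[("ID", 3), ("foot", 0)], [("ID", 4)], [("ID", 9)]]

-- On the empty list A raises IndexError (frame_list[0]); B returns [] (groupby of nothing).
def Raises_create_frame_chunks (frame_list : List (List (String × Int))) : Prop :=
  frame_list = []
instance (frame_list : List (List (String × Int))) : Decidable (Raises_create_frame_chunks frame_list) := by unfold Raises_create_frame_chunks; infer_instance
def pvRaiseWitness_create_frame_chunks : (List (List (String × Int))) := []
def pvRaiseWitnessOut_create_frame_chunks : List (List (List (String × Int))) := []

def Spec_create_frame_chunks (frame_list : List (List (String × Int))) (out : List (List (List (String × Int)))) : Prop := out = create_frame_chunks_alt frame_list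
instance (frame_list : List (List (String × Int))) (out : List (List (List (String × Int)))) : Decidable (Spec_create_frame_chunks frame_list out) := by unfold Spec_create_frame_chunks; infer_instance

-- ===== CLAIM (what is proved, stated in full; the proofs are below) =====
def Claim_equal_create_frame_chunks : Prop := ∀ (frame_list : List (List (String × Int))), Dom_create_frame_chunks frame_list → Pre_create_frame_chunks frame_list → Spec_create_frame_chunks frame_list (create_frame_chunks frame_list)

def Claim_raises_create_frame_chunks : Prop := (∀ (frame_list : List (List (String × Int))), Dom_create_frame_chunks frame_list → Raises_create_frame_chunks frame_list → ¬ Pre_create_frame_chunks frame_list) ∧ (Dom_create_frame_chunks (pvRaiseWitness_create_frame_chunks) ∧ Raises_create_frame_chunks (pvRaiseWitness_create_frame_chunks) ∧ create_frame_chunks_alt (pvRaiseWitness_create_frame_chunks) = pvRaiseWitnessOut_create_frame_chunks)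

-- ===== LEMMAS AND PROOFS =====

-- adjacency relation: next frame's ID is previous frame's ID + 1
def pvAdj (t f : List (String × Int)) : Bool := pvID f == pvID t + 1

-- grouping of a list into maximal pvAdj-runs, groupby-shaped
def pvGAdj : List (List (String × Int)) → List (List (List (String × Int)))
  | [] => []
  | [x] => [[x]]
  | x :: y :: xs =>
    match pvGAdj (y :: xs) with
    | [] => [[x]]
    | g :: gs => if pvAdj x y then (x :: g) :: gs else [x] :: g :: gs

theorem pvAppendLast_append (l : List (List (List (String × Int)))) (c : List (List (String × Int)))
    (f : List (String × Int)) : pvAppendLast (l ++ [c]) f = l ++ [c ++ [f]] := by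
  induction l with
  | nil => rfl
  | cons a as ih =>
    cases as with
    | nil => simp [pvAppendLast]
    | cons b bs => simpa [pvAppendLast] using ih

-- A's loop state, abstracted: previous frame t, current chunk cur, finished prefix pre
def pvG (t : List (String × Int)) (cur : List (List (String × Int)))
    (xs : List (List (String × Int))) : List (List (List (String × Int))) :=
  match xs with
  | [] => [cur]
  | f :: fs => if pvAdj t f then pvG f (cur ++ [f]) fs else cur :: pvG f [f] fs

theorem pvFoldl_eq_pvG (xs : List (List (String × Int))) (t : List (String × Int))
    (cur : List (List (String × Int))) (pre : List (List (List (String × Int)))) :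
    (xs.foldl
      (fun (st : List (String × Int) × List (List (List (String × Int)))) frame =>
        if pvID frame == pvID st.1 + 1 then (frame, pvAppendLast st.2 frame)
        else (frame, st.2 ++ [[frame]]))
      (t, pre ++ [cur])).2 = pre ++ pvG t cur xs := by
  induction xs generalizing t cur pre with
  | nil => simp [pvG]
  | cons f fs ih =>
    by_cases h : pvID f = pvID t + 1
    · simpa [List.foldl_cons, h, pvG, pvAdj, pvAppendLast_append] using ih f (cur ++ [f]) pre
    · have := ih f [f] (pre ++ [cur])
      simp only [List.append_assoc, List.singleton_append] at this
      simpa [List.foldl_cons, h, pvG, pvAdj] using this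

-- pvG with the run started at t equals the head-recursive grouping pvGAdj
theorem pvG_eq_pvGAdj (xs : List (List (String × Int))) (t : List (String × Int))
    (cur : List (List (String × Int))) :
    ∃ h rest, pvGAdj (t :: xs) = (t :: h) :: rest ∧ pvG t cur xs = (cur ++ h) :: rest := by
  induction xs generalizing t cur with
  | nil => exact ⟨[], [], rfl, by simp [pvG]⟩
  | cons y ys ih =>
    obtain ⟨h, rest, hg, _⟩ := ih y [y]
    by_cases hadj : pvAdj t y
    · obtain ⟨h', rest', hg', hG'⟩ := ih y (cur ++ [y])
      rw [hg] at hg'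
      injection hg' with e1 e2
      injection e1 with _ e1
      refine ⟨y :: h, rest, by simp [pvGAdj, hg, hadj], ?_⟩
      simp [pvG, hadj, hG', e1, e2]
    · obtain ⟨h0, rest0, hg0, hG0⟩ := ih y [y]
      rw [hg] at hg0
      injection hg0 with e1 e2
      injection e1 with _ e1
      refine ⟨[], pvGAdj (y :: ys), by simp [pvGAdj, hg, hadj], ?_⟩
      simp [pvG, hadj, hG0, hg, e1, e2]

-- A on a nonempty list computes pvGAdj
theorem create_frame_chunks_eq_pvGAdj (t : List (String × Int)) (xs : List (List (String × Int))) :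
    create_frame_chunks (t :: xs) = pvGAdj (t :: xs) := by
  obtain ⟨h, rest, hg, hG⟩ := pvG_eq_pvGAdj xs t [t]
  have hf := pvFoldl_eq_pvG xs t [t] []
  simp only [List.nil_append] at hf
  simp only [create_frame_chunks]
  rw [hf, hG, hg]
  simp

theorem pvGroupBy_ne_nil {α : Type} (k : α → Int) (x : α) (xs : List α) :
    pvGroupBy k (x :: xs) ≠ [] := by
  cases xs with
  | nil => simp [pvGroupBy]
  | cons y ys =>
    rw [pvGroupBy]
    cases h : pvGroupBy k (y :: ys) with
    | nil => simp
    | cons g gs => by_cases hk : k x == k y <;> simp [hk]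

theorem pvGAdj_ne_nil (x : List (String × Int)) (xs : List (List (String × Int))) :
    pvGAdj (x :: xs) ≠ [] := by
  cases xs with
  | nil => simp [pvGAdj]
  | cons y ys =>
    rw [pvGAdj]
    cases h : pvGAdj (y :: ys) with
    | nil => simp
    | cons g gs => by_cases hk : pvAdj x y <;> simp [hk]

-- B's grouping over enumerate, with the index dropped, is grouping by pvAdj
theorem pvGroupBy_enumerate (xs : List (List (String × Int))) (n : Int) :
    (pvGroupBy (fun p => pvID p.2 - p.1) (PySem.List.enumerate xs n)).map
      (fun g => g.map (·.2)) = pvGAdj xs := by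
  induction xs generalizing n with
  | nil => simp [PySem.List.enumerate_nil, pvGroupBy, pvGAdj]
  | cons x xs ih =>
    cases xs with
    | nil => simp [PySem.List.enumerate_cons, PySem.List.enumerate_nil, pvGroupBy, pvGAdj]
    | cons y ys =>
      have ih' := ih (n + 1)
      rw [PySem.List.enumerate_cons] at ih'
      rw [PySem.List.enumerate_cons, PySem.List.enumerate_cons]
      obtain ⟨g, gs, hg⟩ : ∃ g gs,
          pvGroupBy (fun p : Int × List (String × Int) => pvID p.2 - p.1)
            ((n + 1, y) :: PySem.List.enumerate ys (n + 1 + 1)) = g :: gs := by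
        cases hcase : pvGroupBy (fun p : Int × List (String × Int) => pvID p.2 - p.1)
            ((n + 1, y) :: PySem.List.enumerate ys (n + 1 + 1)) with
        | nil => exact absurd hcase (pvGroupBy_ne_nil _ _ _)
        | cons g gs => exact ⟨g, gs, rfl⟩
      obtain ⟨g', gs', hys⟩ : ∃ g' gs', pvGAdj (y :: ys) = g' :: gs' := by
        cases hcase : pvGAdj (y :: ys) with
        | nil => exact absurd hcase (pvGAdj_ne_nil _ _)
        | cons g' gs' => exact ⟨g', gs', rfl⟩
      rw [hg] at ih'
      rw [hys] at ih'
      simp only [List.map_cons] at ih'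
      injection ih' with e1 e2
      simp only [pvGroupBy, pvGAdj]
      rw [hg, hys]
      by_cases h : pvID y = pvID x + 1
      · have c1 : ((pvID x - n : Int) == pvID y - (n + 1)) = true := by
          simp only [beq_iff_eq]; omega
        have c2 : pvAdj x y = true := by simp [pvAdj, h]
        simp [c1, c2, e1, e2]
      · have c1 : ((pvID x - n : Int) == pvID y - (n + 1)) = false := by
          simp only [beq_eq_false_iff_ne, ne_eq]; omega
        have c2 : pvAdj x y = false := by simp [pvAdj, h]
        simp [c1, c2, e1, e2]

-- ===== VERDICT (by name: the statement is the Claim_ definition above) =====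
theorem create_frame_chunks_spec : Claim_equal_create_frame_chunks := by
  intro fl _ hpre
  unfold Spec_create_frame_chunks
  cases fl with
  | nil => exact absurd rfl hpre.1
  | cons t xs =>
    rw [create_frame_chunks_eq_pvGAdj]
    unfold create_frame_chunks_alt
    rw [pvGroupBy_enumerate]

theorem create_frame_chunks_raises : Claim_raises_create_frame_chunks := by
  unfold Claim_raises_create_frame_chunks
  exact ⟨fun fl _ hr hpre => hpre.1 hr, by decide⟩

-- witness self-check: the raises-witness facts extracted from the theorem above
theorem create_frame_chunks_raises_witness_ok :
    Raises_create_frame_chunks pvRaiseWitness_create_frame_chunks ∧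
    create_frame_chunks_alt pvRaiseWitness_create_frame_chunks = pvRaiseWitnessOut_create_frame_chunks := by
  have h := create_frame_chunks_raises
  unfold Claim_raises_create_frame_chunks at h
  exact h.2.2
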